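-- pv_equiv track=rewrite | github.com/marcomoauro/twitter | ner_training/training_data/all/run.py | permutation_labels
-- ===== SOURCE A (Python) =====
-- from itertools import permutations
--
-- def permutation_labels(label):
--     perms_labels = []
--     array_label = label.split(' ')
--     perms = list(permutations(range(0, len(array_label))))
--     for perm in perms:
--         l = []
--         for i in perm:
--             l.append(array_label[i])
--         perms_labels.append(' '.join(l))
--     return perms_labels
-- ===== SOURCE B (Python) =====
-- def permutation_labels(label):
--     words = label.split(' ')
--     out = []
--
--     def go(remaining, prefix):
--         if not remaining:
--             out.append(' '.join(prefix))
--             return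
--         for j in range(len(remaining)):
--             go(remaining[:j] + remaining[j + 1:], prefix + [remaining[j]])
--
--     go(words, [])
--     return out
-- ===== Notes on version B (the rewrite author's own statement) =====
-- stated objective: alternative
-- what changed: Replaces the itertools index-tuple enumeration plus a separate index-lookup/join pass with a direct recursive generator that picks each remaining word position left-to-right, carrying the growing prefix and emitting the joined string at the base case.
import Mathlib
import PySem

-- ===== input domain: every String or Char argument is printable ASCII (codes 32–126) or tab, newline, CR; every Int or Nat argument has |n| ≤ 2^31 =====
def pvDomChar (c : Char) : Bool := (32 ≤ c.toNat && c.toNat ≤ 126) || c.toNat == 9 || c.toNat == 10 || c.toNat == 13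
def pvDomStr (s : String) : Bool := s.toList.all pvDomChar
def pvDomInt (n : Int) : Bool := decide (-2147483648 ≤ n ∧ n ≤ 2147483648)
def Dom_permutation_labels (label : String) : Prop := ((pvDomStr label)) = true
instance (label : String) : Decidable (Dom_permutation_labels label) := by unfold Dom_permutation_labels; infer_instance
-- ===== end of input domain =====

-- B replaces A's itertools index-tuple enumeration + lookup/join pass by a direct recursive
-- permutation generator over the word list (same output, same cost; objective: alternative).


-- ===== PORT A =====
def permutation_labels (label : String) : List String :=
  let perms_labels : List String := []
  -- label.split(' '): the separator " " is nonempty, so split? is always `some` — exact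
  let array_label := (PySem.Str.split? label " ").getD []
  -- list(permutations(range(0, len(array_label)))): PySem.List.permutations is itertools.permutations
  let idx := PySem.List.pyRange 0 (PySem.List.len array_label) 1
  let perms := PySem.List.permutations idx idx.length
  perms.foldl (fun perms_labels perm =>
    -- array_label[i]: i comes from a permutation of range(len(array_label)), always in range — exact
    let l := perm.foldl (fun l i => l ++ [PySem.List.pyGetD array_label i ""]) []
    perms_labels ++ [PySem.Str.join " " l]) perms_labels

-- ===== PORT B =====
-- go(remaining, prefix): pick each remaining position left-to-right, recurse on the rest
def pvPermJoin (rem : List String) (pre : List String) : List String :=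
  if rem.isEmpty then [PySem.Str.join " " pre]
  else (List.range rem.length).attach.flatMap (fun j =>
    -- remaining[j] with j from range(len(remaining)): always in range — exact
    pvPermJoin (rem.eraseIdx j.1) (pre ++ [rem.getD j.1 ""]))
termination_by rem.length
decreasing_by
  have hj := List.mem_range.mp j.2
  simp [List.length_eraseIdx, hj]
  omega

def permutation_labels_alt (label : String) : List String :=
  pvPermJoin ((PySem.Str.split? label " ").getD []) []

-- ===== PRECONDITION & SPEC =====
def Spec_permutation_labels (label : String) (out : List String) : Prop := out = permutation_labels_alt label
instance (label : String) (out : List String) : Decidable (Spec_permutation_labels label out) := by unfold Spec_permutation_labels; infer_instance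

-- ===== CLAIM (what is proved, stated in full; the proofs are below) =====
def Claim_equal_permutation_labels : Prop := ∀ (label : String), Dom_permutation_labels label → Spec_permutation_labels label (permutation_labels label)

-- ===== LEMMAS AND PROOFS =====

-- permutations of a mapped list = mapped permutations (positions, not values, drive the generator)
theorem pv_perms_map {α β : Type} (f : α → β) :
    ∀ (r : Nat) (l : List α),
      PySem.List.permutations (l.map f) r = (PySem.List.permutations l r).map (List.map f) := by
  intro r
  induction r with
  | zero => intro l; simp [PySem.List.permutations]
  | succ r ih =>
    intro l
    simp only [PySem.List.permutations, List.length_map, List.map_flatMap]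
    apply List.flatMap_congr
    intro i hi
    have hi' := List.mem_range.mp hi
    rw [List.getElem?_map, List.getElem?_eq_getElem hi']
    simp [List.eraseIdx_map, ih, List.map_map, Function.comp_def]

-- B's recursion computes the joined permutations of its word list
theorem pv_permJoin_eq (n : Nat) :
    ∀ (ws pre : List String), ws.length = n →
      pvPermJoin ws pre =
        (PySem.List.permutations ws ws.length).map (fun p => PySem.Str.join " " (pre ++ p)) := by
  induction n with
  | zero =>
    intro ws pre h
    have : ws = [] := List.length_eq_zero_iff.mp h
    subst this
    rw [pvPermJoin]
    simp
  | succ r ih =>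
    intro ws pre h
    have hne : ws.isEmpty = false := by
      rcases ws with _ | _ <;> simp_all
    rw [pvPermJoin, if_neg (by simp [hne]), h]
    simp only [PySem.List.permutations, List.map_flatMap, List.flatMap_subtype,
      List.unattach_attach, h]
    apply List.flatMap_congr
    intro j hj
    have hj' : j < ws.length := by
      have := List.mem_range.mp hj; omega
    have hlen : (ws.eraseIdx j).length = r := by
      simp [List.length_eraseIdx, hj']; omega
    rw [List.getElem?_eq_getElem hj', List.getD_eq_getElem ws "" hj',
        ih (ws.eraseIdx j) (pre ++ [ws[j]]) hlen, hlen]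
    simp [List.map_map, Function.comp_def]

-- ===== VERDICT (by name: the statement is the Claim_ definition above) =====
theorem permutation_labels_spec : Claim_equal_permutation_labels := by
  intro label _
  unfold Spec_permutation_labels permutation_labels permutation_labels_alt
  set ws := (PySem.Str.split? label " ").getD [] with hws
  simp only [PySem.List.foldl_append_singleton_eq_map, List.nil_append]
  rw [pv_permJoin_eq ws.length ws [] rfl]
  have hidx : (PySem.List.pyRange 0 (PySem.List.len ws) 1).length = ws.length := by
    simp [PySem.List.length_pyRange_one, PySem.List.len]
  rw [hidx]
  have hmap : (PySem.List.pyRange 0 (PySem.List.len ws) 1).map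
      (fun i => PySem.List.pyGetD ws i "") = ws := PySem.List.map_pyGetD_pyRange_zero ws ""
  calc (PySem.List.permutations (PySem.List.pyRange 0 (PySem.List.len ws) 1) ws.length).map
        (fun perm => PySem.Str.join " " (perm.map (fun i => PySem.List.pyGetD ws i "")))
      = ((PySem.List.permutations (PySem.List.pyRange 0 (PySem.List.len ws) 1) ws.length).map
          (List.map (fun i => PySem.List.pyGetD ws i ""))).map
          (fun p => PySem.Str.join " " p) := by
        simp [List.map_map, Function.comp_def]
    _ = (PySem.List.permutations ws ws.length).map (fun p => PySem.Str.join " " p) := by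
        rw [← pv_perms_map, hmap]
    _ = (PySem.List.permutations ws ws.length).map (fun p => PySem.Str.join " " ([] ++ p)) := by
        simp
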